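-- pv_equiv track=rewrite | github.com/LongWeeeeeee/bets | base/test_filters.py | is_early_match_stable35k_4min
-- ===== SOURCE A (Python) =====
-- from typing import Tuple, Optional, Dict, Any
--
-- def is_early_match_stable35k_4min(match: Dict) -> Tuple[bool, Optional[str]]:
--     """Stable lead >= 3.5k минимум 4 минуты подряд на 15-30."""
--     leads = match.get('radiantNetworthLeads', [])
--     duration = len(leads)
--
--     if duration < 30 or duration > 50:
--         return False, None
--
--     consecutive_r = 0
--     consecutive_d = 0
--
--     for i in range(15, min(30, duration)):
--         if leads[i] >= 3500:
--             consecutive_r += 1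
--             consecutive_d = 0
--             if consecutive_r >= 4:
--                 return True, 'radiant'
--         elif leads[i] <= -3500:
--             consecutive_d += 1
--             consecutive_r = 0
--             if consecutive_d >= 4:
--                 return True, 'dire'
--         else:
--             consecutive_r = 0
--             consecutive_d = 0
--
--     return False, None
-- ===== SOURCE B (Python) =====
-- from typing import Tuple, Optional, Dict
--
-- def is_early_match_stable35k_4min(match: Dict) -> Tuple[bool, Optional[str]]:
--     """Stable lead >= 3.5k минимум 4 минуты подряд на 15-30 (sliding-window scan)."""
--     leads = match.get('radiantNetworthLeads', [])
--     duration = len(leads)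
--
--     if duration < 30 or duration > 50:
--         return False, None
--
--     window = leads[15:30]
--     while len(window) >= 4:
--         head = window[:4]
--         if all(x >= 3500 for x in head):
--             return True, 'radiant'
--         if all(x <= -3500 for x in head):
--             return True, 'dire'
--         window = window[1:]
--
--     return False, None
-- ===== Notes on version B (the rewrite author's own statement) =====
-- stated objective: alternative
-- what changed: Replaced the two consecutive-run counters over indices 15..29 by a sliding-window scan: take the 15-30 slice and repeatedly test whether its first four elements are all >= 3500 (radiant) or all <= -3500 (dire), shrinking the window by one; the earliest qualifying window coincides with the first counter that reaches 4.
import Mathlib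
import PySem

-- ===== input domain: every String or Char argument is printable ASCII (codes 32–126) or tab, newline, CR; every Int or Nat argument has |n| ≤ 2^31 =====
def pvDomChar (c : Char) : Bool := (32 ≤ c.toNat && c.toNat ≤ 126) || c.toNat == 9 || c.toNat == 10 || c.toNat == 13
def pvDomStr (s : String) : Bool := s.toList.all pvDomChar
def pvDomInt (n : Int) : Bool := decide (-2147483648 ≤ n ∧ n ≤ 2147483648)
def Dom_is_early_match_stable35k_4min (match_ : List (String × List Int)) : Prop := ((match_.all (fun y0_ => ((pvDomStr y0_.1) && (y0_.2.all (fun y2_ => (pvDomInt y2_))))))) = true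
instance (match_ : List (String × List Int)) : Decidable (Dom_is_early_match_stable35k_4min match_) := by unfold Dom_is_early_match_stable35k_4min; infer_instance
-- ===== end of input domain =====

-- B replaces A's two consecutive-run counters by a sliding-window scan over the 15-30 slice
-- (same result; no speed claim — both are bounded scans).

-- ===== PORT A =====
-- A's for-loop over range(15, min(30, duration)) with the two counters; early return via recursion.
-- leads[i] is always in range here (the duration guard gives 30 ≤ len and i < 30), so the
-- pyGetD default 0 is never used.
def aLoop (leads : List Int) : List Int → Int → Int → Bool × Option String
  | [], _, _ => (false, none)
  | i :: rest, cr, cd =>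
    let x := PySem.List.pyGetD leads i 0
    if 3500 ≤ x then
      if 4 ≤ cr + 1 then (true, some "radiant") else aLoop leads rest (cr + 1) 0
    else if x ≤ -3500 then
      if 4 ≤ cd + 1 then (true, some "dire") else aLoop leads rest 0 (cd + 1)
    else aLoop leads rest 0 0

def is_early_match_stable35k_4min (match_ : List (String × List Int)) : Bool × Option String :=
  let leads := (PySem.Dict.mk match_).getD "radiantNetworthLeads" []
  let duration : Int := leads.length
  if duration < 30 ∨ duration > 50 then (false, none)
  else aLoop leads (PySem.List.pyRange 15 (min 30 duration) 1) 0 0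

-- ===== PORT B =====
-- Source B's while-loop: 'while len(window) >= 4: head = window[:4]; …; window = window[1:]';
-- window[1:] of a nonempty list is its tail, giving the structural recursion.
def bLoop : List Int → Bool × Option String
  | [] => (false, none)
  | x :: t =>
    if ((x :: t).length : Int) < 4 then (false, none)
    else
      let head := PySem.List.slice (x :: t) none (some 4)
      if head.all (fun v => 3500 ≤ v) then (true, some "radiant")
      else if head.all (fun v => v ≤ -3500) then (true, some "dire")
      else bLoop t

def is_early_match_stable35k_4min_alt (match_ : List (String × List Int)) : Bool × Option String :=
  let leads := (PySem.Dict.mk match_).getD "radiantNetworthLeads" []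
  let duration : Int := leads.length
  if duration < 30 ∨ duration > 50 then (false, none)
  else bLoop (PySem.List.slice leads (some 15) (some 30))

-- ===== PRECONDITION & SPEC =====
def Spec_is_early_match_stable35k_4min (match_ : List (String × List Int)) (out : Bool × Option String) : Prop := out = is_early_match_stable35k_4min_alt match_
instance (match_ : List (String × List Int)) (out : Bool × Option String) : Decidable (Spec_is_early_match_stable35k_4min match_ out) := by unfold Spec_is_early_match_stable35k_4min; infer_instance

-- ===== CLAIM (what is proved, stated in full; the proofs are below) =====
def Claim_equal_is_early_match_stable35k_4min : Prop := ∀ (match_ : List (String × List Int)), Dom_is_early_match_stable35k_4min match_ → Spec_is_early_match_stable35k_4min match_ (is_early_match_stable35k_4min match_)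

-- ===== LEMMAS AND PROOFS =====

-- A's loop on the values themselves (proof-level mirror of aLoop).
def aVals : List Int → Int → Int → Bool × Option String
  | [], _, _ => (false, none)
  | x :: xs, cr, cd =>
    if 3500 ≤ x then
      if 4 ≤ cr + 1 then (true, some "radiant") else aVals xs (cr + 1) 0
    else if x ≤ -3500 then
      if 4 ≤ cd + 1 then (true, some "dire") else aVals xs 0 (cd + 1)
    else aVals xs 0 0

-- classification of a value into the three cases both programs distinguish
def pvNorm (x : Int) : Int := if 3500 ≤ x then 3500 else if x ≤ -3500 then -3500 else 0

theorem aVals_norm (xs : List Int) : ∀ cr cd, aVals (xs.map pvNorm) cr cd = aVals xs cr cd := by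
  induction xs with
  | nil => intro cr cd; rfl
  | cons x xs ih =>
    intro cr cd
    by_cases h1 : 3500 ≤ x
    · have hx : pvNorm x = 3500 := by simp [pvNorm, h1]
      simp only [List.map_cons, hx, aVals]
      rw [if_pos (by omega : (3500:Int) ≤ 3500), if_pos h1]
      split
      · rfl
      · exact ih _ _
    · by_cases h2 : x ≤ -3500
      · have hx : pvNorm x = -3500 := by simp [pvNorm, h1, h2]
        simp only [List.map_cons, hx, aVals]
        rw [if_neg (by omega : ¬ (3500:Int) ≤ -3500), if_neg h1,
            if_pos (by omega : (-3500:Int) ≤ -3500), if_pos h2]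
        split
        · rfl
        · exact ih _ _
      · have hx : pvNorm x = 0 := by simp [pvNorm, h1, h2]
        simp only [List.map_cons, hx, aVals]
        rw [if_neg (by omega : ¬ (3500:Int) ≤ 0), if_neg h1,
            if_neg (by omega : ¬ (0:Int) ≤ -3500), if_neg h2]
        exact ih _ _

-- window[:4] is take 4
theorem slice_take4 (ys : List Int) : PySem.List.slice ys none (some 4) = ys.take 4 := by
  rw [PySem.List.slice_to ys (by omega), show (4:Int).toNat = 4 from by decide]

-- the head of a list is in any nonempty take of it
theorem head_mem_take (a : Int) (t : List Int) (n : Nat) (h : 1 ≤ n) : a ∈ (a :: t).take n := by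
  obtain ⟨m, rfl⟩ : ∃ m, n = m + 1 := ⟨n - 1, by omega⟩
  simp

theorem bLoop_norm (xs : List Int) : bLoop (xs.map pvNorm) = bLoop xs := by
  induction xs with
  | nil => rfl
  | cons x xs ih =>
    simp only [List.map_cons, bLoop, slice_take4]
    have hlen : ((pvNorm x :: xs.map pvNorm).length : Int) = ((x :: xs).length : Int) := by simp
    rw [hlen]
    split
    · rfl
    · have htake : (pvNorm x :: xs.map pvNorm).take 4
          = ((x :: xs).take 4).map pvNorm := by
        simp [List.map_take]
      have hge : ∀ v, (decide (3500 ≤ pvNorm v)) = (decide (3500 ≤ v)) := by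
        intro v; unfold pvNorm; split_ifs <;> simp_all <;> omega
      have hle : ∀ v, (decide (pvNorm v ≤ -3500)) = (decide (v ≤ -3500)) := by
        intro v; unfold pvNorm; split_ifs <;> simp_all <;> omega
      rw [htake]
      have hallge : ∀ l : List Int, (l.map pvNorm).all (fun v => decide (3500 ≤ v))
          = l.all (fun v => decide (3500 ≤ v)) := by
        intro l; induction l with
        | nil => rfl
        | cons a l ih2 => simp only [List.map_cons, List.all_cons, hge a, ih2]
      have hallle : ∀ l : List Int, (l.map pvNorm).all (fun v => decide (v ≤ -3500))
          = l.all (fun v => decide (v ≤ -3500)) := by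
        intro l; induction l with
        | nil => rfl
        | cons a l ih2 => simp only [List.map_cons, List.all_cons, hle a, ih2]
      simp only [hallge, hallle]
      split
      · rfl
      · split
        · rfl
        · exact ih

-- bLoop returns (false, none) on windows shorter than 4
theorem bLoop_short (xs : List Int) (h : xs.length < 4) : bLoop xs = (false, none) := by
  cases xs with
  | nil => rfl
  | cons x t =>
    rw [bLoop, if_pos]
    exact_mod_cast h

-- a pad of up to three -3500's in front of a 3500 never completes a window and is consumed
theorem padR (p : Nat) (hp : p ≤ 3) (t : List Int) :
    bLoop (List.replicate p (-3500) ++ 3500 :: t) = bLoop (3500 :: t) := by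
  induction p with
  | zero => simp
  | succ p ih =>
    have hp' : p ≤ 3 := by omega
    rw [List.replicate_succ, List.cons_append, bLoop]
    by_cases hlen : ((((-3500:Int) :: (List.replicate p (-3500) ++ 3500 :: t)).length : Int)) < 4
    · rw [if_pos hlen]
      have : (3500 :: t).length < 4 := by simp at hlen ⊢; omega
      exact (bLoop_short _ this).symm
    · rw [if_neg hlen]
      simp only [slice_take4]
      have hge : (((-3500:Int) :: (List.replicate p (-3500) ++ 3500 :: t)).take 4).all
          (fun v => decide (3500 ≤ v)) = false := by
        simp
      have hle : (((-3500:Int) :: (List.replicate p (-3500) ++ 3500 :: t)).take 4).all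
          (fun v => decide (v ≤ -3500)) = false := by
        have hmem : (3500:Int) ∈ ((-3500:Int) :: (List.replicate p (-3500) ++ 3500 :: t)).take 4 := by
          have : (3500:Int) ∈ (((-3500:Int) :: List.replicate p (-3500)) ++ 3500 :: t).take 4 := by
            rw [List.take_append]
            have hl : ((-3500:Int) :: List.replicate p (-3500)).length = p + 1 := by simp
            have : ((-3500:Int) :: List.replicate p (-3500)).take 4
                = (-3500:Int) :: List.replicate p (-3500) := by
              apply List.take_of_length_le; omega
            rw [this]
            apply List.mem_append_right
            rw [hl]
            exact head_mem_take _ _ _ (by omega)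
          simpa using this
        rw [List.all_eq_false]
        exact ⟨_, hmem, by decide⟩
      rw [hge, hle]
      simp only [Bool.false_eq_true, if_false]
      exact ih hp'

theorem padD (p : Nat) (hp : p ≤ 3) (t : List Int) :
    bLoop (List.replicate p 3500 ++ (-3500) :: t) = bLoop ((-3500) :: t) := by
  induction p with
  | zero => simp
  | succ p ih =>
    have hp' : p ≤ 3 := by omega
    rw [List.replicate_succ, List.cons_append, bLoop]
    by_cases hlen : ((((3500:Int) :: (List.replicate p 3500 ++ (-3500) :: t)).length : Int)) < 4
    · rw [if_pos hlen]
      have : ((-3500:Int) :: t).length < 4 := by simp at hlen ⊢; omega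
      exact (bLoop_short _ this).symm
    · rw [if_neg hlen]
      simp only [slice_take4]
      have hmem : (-3500:Int) ∈ ((3500:Int) :: (List.replicate p 3500 ++ (-3500) :: t)).take 4 := by
        have : (-3500:Int) ∈ (((3500:Int) :: List.replicate p 3500) ++ (-3500) :: t).take 4 := by
          rw [List.take_append]
          have hl : ((3500:Int) :: List.replicate p 3500).length = p + 1 := by simp
          have : ((3500:Int) :: List.replicate p 3500).take 4
              = (3500:Int) :: List.replicate p 3500 := by
            apply List.take_of_length_le; omega
          rw [this]
          apply List.mem_append_right
          rw [hl]
          exact head_mem_take _ _ _ (by omega)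
        simpa using this
      have hge : (((3500:Int) :: (List.replicate p 3500 ++ (-3500) :: t)).take 4).all
          (fun v => decide (3500 ≤ v)) = false := by
        rw [List.all_eq_false]
        exact ⟨_, hmem, by decide⟩
      have hle : (((3500:Int) :: (List.replicate p 3500 ++ (-3500) :: t)).take 4).all
          (fun v => decide (v ≤ -3500)) = false := by
        simp
      rw [hge, hle]
      simp only [Bool.false_eq_true, if_false]
      exact ih hp'

-- a pad of up to three equal extreme values in front of a neutral value is consumed entirely
theorem padN (c : Int) (p : Nat) (hp : p ≤ 3) (t : List Int) :
    bLoop (List.replicate p c ++ 0 :: t) = bLoop t := by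
  induction p with
  | zero =>
    simp only [List.replicate_zero, List.nil_append]
    rw [bLoop]
    by_cases hlen : ((((0:Int) :: t).length : Int)) < 4
    · rw [if_pos hlen]
      have : t.length < 4 := by simp at hlen; omega
      exact (bLoop_short _ this).symm
    · rw [if_neg hlen]
      simp only [slice_take4]
      simp
  | succ p ih =>
    have hp' : p ≤ 3 := by omega
    rw [List.replicate_succ, List.cons_append, bLoop]
    by_cases hlen : (((c :: (List.replicate p c ++ 0 :: t)).length : Int)) < 4
    · rw [if_pos hlen]
      have : t.length < 4 := by simp at hlen; omega
      exact (bLoop_short _ this).symm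
    · rw [if_neg hlen]
      simp only [slice_take4]
      have hmem : (0:Int) ∈ (c :: (List.replicate p c ++ 0 :: t)).take 4 := by
        have : (0:Int) ∈ ((c :: List.replicate p c) ++ 0 :: t).take 4 := by
          rw [List.take_append]
          have hl : (c :: List.replicate p c).length = p + 1 := by simp
          have : (c :: List.replicate p c).take 4 = c :: List.replicate p c := by
            apply List.take_of_length_le; omega
          rw [this]
          apply List.mem_append_right
          rw [hl]
          exact head_mem_take _ _ _ (by omega)
        simpa using this
      have hge : ((c :: (List.replicate p c ++ 0 :: t)).take 4).all
          (fun v => decide (3500 ≤ v)) = false := by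
        rw [List.all_eq_false]
        exact ⟨_, hmem, by decide⟩
      have hle : ((c :: (List.replicate p c ++ 0 :: t)).take 4).all
          (fun v => decide (v ≤ -3500)) = false := by
        rw [List.all_eq_false]
        exact ⟨_, hmem, by decide⟩
      rw [hge, hle]
      simp only [Bool.false_eq_true, if_false]
      exact ih hp'

-- main invariant: the counters correspond to a virtual pad of extreme values in front of the window
theorem main_norm (xs : List Int) (hn : ∀ x ∈ xs, x = 3500 ∨ x = -3500 ∨ x = 0) :
    ∀ cr cd : Int, 0 ≤ cr → cr ≤ 3 → 0 ≤ cd → cd ≤ 3 → (cr = 0 ∨ cd = 0) →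
    aVals xs cr cd = bLoop (List.replicate cr.toNat 3500 ++ List.replicate cd.toNat (-3500) ++ xs) := by
  induction xs with
  | nil =>
    intro cr cd h1 h2 h3 h4 h5
    rw [aVals]
    refine (bLoop_short _ ?_).symm
    simp; omega
  | cons x xs ih =>
    intro cr cd h1 h2 h3 h4 h5
    have hx := hn x (by simp)
    have hn' : ∀ y ∈ xs, y = 3500 ∨ y = -3500 ∨ y = 0 := fun y hy => hn y (by simp [hy])
    rcases hx with hx | hx | hx
    · subst hx
      rw [aVals, if_pos (by omega)]
      by_cases h4c : (4:Int) ≤ cr + 1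
      · -- cr = 3, cd = 0: the window [3500,3500,3500,3500] completes
        have hcr : cr = 3 := by omega
        have hcd : cd = 0 := by omega
        subst hcr; subst hcd
        rw [if_pos h4c]
        rw [show List.replicate (Int.toNat 3) (3500:Int) ++ List.replicate (Int.toNat 0) (-3500:Int) ++ 3500 :: xs
            = 3500 :: 3500 :: 3500 :: 3500 :: xs by
          rw [show (3:Int).toNat = 3 from by decide]; simp [List.replicate]]
        rw [bLoop, if_neg (by simp; omega)]
        simp only [slice_take4]
        simp
      · rw [if_neg h4c]
        rw [ih hn' (cr + 1) 0 (by omega) (by omega) (by omega) (by omega) (by omega)]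
        rcases h5 with h5 | h5
        · -- cr = 0, cd may be positive: consume the dire pad (padR)
          subst h5
          simp only [show ((0:Int) + 1).toNat = 1 from by decide, Int.toNat_zero,
            List.replicate_zero, List.nil_append, List.append_nil, List.replicate_one,
            List.singleton_append]
          exact (padR cd.toNat (by omega) xs).symm
        · subst h5
          simp only [show ∀ cr : Int, 0 ≤ cr → (cr + 1).toNat = cr.toNat + 1 from
            fun cr h => by omega, h1, Int.toNat_zero, List.replicate_zero,
            List.append_nil, List.replicate_succ', List.append_assoc, List.singleton_append]
    · subst hx
      rw [aVals, if_neg (by omega), if_pos (by omega)]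
      by_cases h4c : (4:Int) ≤ cd + 1
      · have hcd : cd = 3 := by omega
        have hcr : cr = 0 := by omega
        subst hcd; subst hcr
        rw [if_pos h4c]
        rw [show List.replicate (Int.toNat 0) (3500:Int) ++ List.replicate (Int.toNat 3) (-3500:Int) ++ (-3500) :: xs
            = (-3500) :: (-3500) :: (-3500) :: (-3500) :: xs by
          rw [show (3:Int).toNat = 3 from by decide]; simp [List.replicate]]
        rw [bLoop, if_neg (by simp; omega)]
        simp only [slice_take4]
        simp
      · rw [if_neg h4c]
        rw [ih hn' 0 (cd + 1) (by omega) (by omega) (by omega) (by omega) (by omega)]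
        rcases h5 with h5 | h5
        · subst h5
          simp only [show ∀ cd : Int, 0 ≤ cd → (cd + 1).toNat = cd.toNat + 1 from
            fun cd h => by omega, h3, Int.toNat_zero, List.replicate_zero, List.nil_append,
            List.replicate_succ', List.append_assoc, List.singleton_append]
        · subst h5
          simp only [show ((0:Int) + 1).toNat = 1 from by decide, Int.toNat_zero,
            List.replicate_zero, List.nil_append, List.append_nil, List.replicate_one,
            List.singleton_append]
          exact (padD cr.toNat (by omega) xs).symm
    · subst hx
      rw [aVals, if_neg (by omega), if_neg (by omega)]
      rw [ih hn' 0 0 (by omega) (by omega) (by omega) (by omega) (by omega)]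
      simp only [Int.toNat_zero, List.replicate_zero, List.nil_append]
      rcases h5 with h5 | h5
      · subst h5
        simp only [Int.toNat_zero, List.replicate_zero, List.nil_append]
        exact (padN (-3500) cd.toNat (by omega) xs).symm
      · subst h5
        simp only [Int.toNat_zero, List.replicate_zero, List.append_nil]
        exact (padN 3500 cr.toNat (by omega) xs).symm

theorem aVals_eq_bLoop (xs : List Int) : aVals xs 0 0 = bLoop xs := by
  have hnrm : ∀ x ∈ xs.map pvNorm, x = 3500 ∨ x = -3500 ∨ x = 0 := by
    intro x hx
    simp only [List.mem_map] at hx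
    obtain ⟨y, -, rfl⟩ := hx
    unfold pvNorm
    split_ifs <;> simp
  rw [← aVals_norm xs 0 0]
  rw [main_norm (xs.map pvNorm) hnrm 0 0 (by omega) (by omega) (by omega) (by omega) (Or.inl rfl)]
  simp only [Int.toNat_zero, List.replicate_zero, List.nil_append]
  exact bLoop_norm xs

-- bridge: A's index loop over range(a, b) equals aVals on the corresponding slice
theorem aLoop_vals (leads : List Int) (b : Nat) (hb : b ≤ leads.length) :
    ∀ (a : Nat) (cr cd : Int), a ≤ b →
    aLoop leads (PySem.List.pyRange a b 1) cr cd = aVals ((leads.drop a).take (b - a)) cr cd := by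
  intro a
  induction h : b - a generalizing a with
  | zero =>
    intro cr cd hab
    have hba : (b : Int) ≤ a := by omega
    rw [PySem.List.pyRange_one_eq_nil hba]
    simp [aLoop, aVals]
  | succ n ih =>
    intro cr cd hab
    have hab' : a < b := by omega
    rw [PySem.List.pyRange_one_cons (by exact_mod_cast hab')]
    have ha : a < leads.length := by omega
    have hget : PySem.List.pyGetD leads (a : Int) 0 = leads[a] := by
      rw [PySem.List.pyGetD_natCast]
      exact List.getD_eq_getElem leads 0 ha
    have hdrop : leads.drop a = leads[a] :: leads.drop (a + 1) := List.drop_eq_getElem_cons ha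
    have htake : (leads.drop a).take (n + 1) = leads[a] :: ((leads.drop (a + 1)).take n) := by
      rw [hdrop, List.take_succ_cons]
    rw [htake]
    have hcast : ((a : Int) + 1) = ((a + 1 : Nat) : Int) := by push_cast; ring
    rw [aLoop, aVals, hget, hcast]
    have ihall := fun cr cd => ih (a + 1) (by omega) cr cd (by omega)
    split
    · split
      · rfl
      · exact ihall _ _
    · split
      · split
        · rfl
        · exact ihall _ _
      · exact ihall _ _

-- ===== VERDICT (by name: the statement is the Claim_ definition above) =====
theorem is_early_match_stable35k_4min_spec : Claim_equal_is_early_match_stable35k_4min := by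
  intro match_ _
  unfold Spec_is_early_match_stable35k_4min
  unfold is_early_match_stable35k_4min is_early_match_stable35k_4min_alt
  set leads := (PySem.Dict.mk match_).getD "radiantNetworthLeads" [] with hleads
  by_cases hg : ((leads.length : Int) < 30 ∨ (leads.length : Int) > 50)
  · simp only [if_pos hg]
  · simp only [if_neg hg]
    simp only [not_or, not_lt] at hg
    have h30 : 30 ≤ leads.length := by exact_mod_cast hg.1
    have hmin : min (30 : Int) (leads.length : Int) = 30 := by omega
    rw [hmin]
    rw [show (15 : Int) = ((15 : Nat) : Int) by norm_num,
        show (30 : Int) = ((30 : Nat) : Int) by norm_num]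
    rw [aLoop_vals leads 30 h30 15 0 0 (by omega)]
    rw [PySem.List.slice_natCast]
    exact aVals_eq_bLoop _
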